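-- pv_equiv track=rewrite | github.com/ZigaBobnar/gps-signal-analysis | bpsk_dsss/digital_signal.py | get_symbols_from_bits
-- ===== SOURCE A (Python) =====
-- def get_symbols_from_bits(bits, symbol_length_bits):
--     symbols = []
--
--     total_possible_symbols = len(bits)//symbol_length_bits
--     for i in range(total_possible_symbols):
--         symbol_offset = i*symbol_length_bits
--
--         symbol = 0
--         for n in range(symbol_length_bits):
--             bit_value = bits[n + symbol_offset]
--             symbol |= bit_value << n
--
--         symbols.append(symbol)
--
--     return symbols
-- ===== SOURCE B (Python) =====
-- def get_symbols_from_bits(bits, symbol_length_bits):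
--     count = len(bits) // symbol_length_bits
--     symbols = []
--     symbol = 0
--     pos = 0
--     for bit in bits[:count * symbol_length_bits]:
--         symbol |= bit << pos
--         pos += 1
--         if pos == symbol_length_bits:
--             symbols.append(symbol)
--             symbol = 0
--             pos = 0
--     return symbols
-- ===== Notes on version B (the rewrite author's own statement) =====
-- stated objective: alternative
-- what changed: Replaced the nested offset-indexed loops (outer over symbols, inner re-indexing bits[n+offset]) with a single flat pass over the prefix of complete symbols, threading an accumulator and bit-position counter that flush at symbol boundaries.
-- outside the precondition, e.g. on get_symbols_from_bits([1, 0], 0): A raises ZeroDivisionError, B raises ZeroDivisionError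
import Mathlib
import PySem

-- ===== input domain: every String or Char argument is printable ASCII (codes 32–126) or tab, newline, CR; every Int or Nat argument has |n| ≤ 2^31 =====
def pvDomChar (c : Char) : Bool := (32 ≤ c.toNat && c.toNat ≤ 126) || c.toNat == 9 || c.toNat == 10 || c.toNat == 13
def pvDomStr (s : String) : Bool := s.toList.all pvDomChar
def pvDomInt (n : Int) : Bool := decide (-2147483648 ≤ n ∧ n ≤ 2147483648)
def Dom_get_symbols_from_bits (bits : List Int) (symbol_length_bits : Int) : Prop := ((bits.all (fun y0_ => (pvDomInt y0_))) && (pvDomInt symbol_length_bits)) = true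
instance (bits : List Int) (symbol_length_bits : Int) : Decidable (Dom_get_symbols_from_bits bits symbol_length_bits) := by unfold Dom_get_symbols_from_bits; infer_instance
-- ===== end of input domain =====

-- B replaces A's nested offset-indexed loops by one flat accumulator/position pass that
-- flushes at symbol boundaries; same cost, different decomposition (objective: alternative).

-- ===== PORT A =====
def get_symbols_from_bits (bits : List Int) (symbol_length_bits : Int) : List Int :=
  let total_possible_symbols := PySem.Int.floordiv (bits.length : Int) symbol_length_bits
  (PySem.List.pyRange 0 total_possible_symbols 1).foldl (fun symbols i =>
    let symbol_offset := i * symbol_length_bits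
    let symbol := (PySem.List.pyRange 0 symbol_length_bits 1).foldl (fun symbol n =>
      let bit_value := PySem.List.pyGetD bits (n + symbol_offset) 0  -- in range for every input admitted by Pre_
      PySem.Int.bor symbol (bit_value <<< n.toNat)) 0
    symbols ++ [symbol]) []

-- ===== PORT B =====
def get_symbols_from_bits_alt (bits : List Int) (symbol_length_bits : Int) : List Int :=
  let count := PySem.Int.floordiv (bits.length : Int) symbol_length_bits
  ((PySem.List.slice bits none (some (count * symbol_length_bits))).foldl
    (fun (st : List Int × Int × Int) (bit : Int) =>
      let symbol := PySem.Int.bor st.2.1 (bit <<< st.2.2.toNat)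
      let pos := st.2.2 + 1
      if pos = symbol_length_bits then (st.1 ++ [symbol], 0, 0) else (st.1, symbol, pos))
    ([], 0, 0)).1

-- ===== PRECONDITION & SPEC =====
-- Pre_ excludes symbol_length_bits = 0, where Python A (and B) raise ZeroDivisionError.
def Pre_get_symbols_from_bits (bits : List Int) (symbol_length_bits : Int) : Prop :=
  symbol_length_bits ≠ 0
instance (bits : List Int) (symbol_length_bits : Int) : Decidable (Pre_get_symbols_from_bits bits symbol_length_bits) := by unfold Pre_get_symbols_from_bits; infer_instance
def pvWitness_get_symbols_from_bits : List Int × Int := ([1, 0, 1, 1, 0, 1], 3)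
def Spec_get_symbols_from_bits (bits : List Int) (symbol_length_bits : Int) (out : List Int) : Prop := out = get_symbols_from_bits_alt bits symbol_length_bits
instance (bits : List Int) (symbol_length_bits : Int) (out : List Int) : Decidable (Spec_get_symbols_from_bits bits symbol_length_bits out) := by unfold Spec_get_symbols_from_bits; infer_instance

-- ===== CLAIM (what is proved, stated in full; the proofs are below) =====
def Claim_equal_get_symbols_from_bits : Prop := ∀ (bits : List Int) (symbol_length_bits : Int), Dom_get_symbols_from_bits bits symbol_length_bits → Pre_get_symbols_from_bits bits symbol_length_bits → Spec_get_symbols_from_bits bits symbol_length_bits (get_symbols_from_bits bits symbol_length_bits)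

-- ===== LEMMAS AND PROOFS =====

-- the little-endian value of a chunk of bits, bit k at position p+k
def symAux (p : Nat) (s : Int) : List Int → Int
  | [] => s
  | b :: t => symAux (p+1) (PySem.Int.bor s (b <<< p)) t

-- symbols of c consecutive chunks of length m, taken from the front
def specSyms (m : Nat) : Nat → List Int → List Int
  | 0, _ => []
  | c+1, l => symAux 0 0 (l.take m) :: specSyms m c (l.drop m)

-- B's step function
def bStep (slb : Int) (st : List Int × Int × Int) (bit : Int) : List Int × Int × Int :=
  let symbol := PySem.Int.bor st.2.1 (bit <<< st.2.2.toNat)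
  let pos := st.2.2 + 1
  if pos = slb then (st.1 ++ [symbol], 0, 0) else (st.1, symbol, pos)

lemma bStep_noflush (slb : Int) (hslb : slb ≤ 0) :
    ∀ (l : List Int) (symbols : List Int) (s p : Int), 0 ≤ p →
      (l.foldl (bStep slb) (symbols, s, p)).1 = symbols := by
  intro l
  induction l with
  | nil => intro _ _ _ _; rfl
  | cons b t ih =>
    intro symbols s p hp
    simp only [List.foldl_cons, bStep]
    rw [if_neg (by omega)]
    exact ih _ _ _ (by omega)

lemma bStep_flush (m : Nat) :
    ∀ (chunk : List Int) (p : Nat) (s : Int) (symbols : List Int),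
      p + chunk.length = m → 0 < chunk.length →
      chunk.foldl (bStep (m : Int)) (symbols, s, (p : Int)) = (symbols ++ [symAux p s chunk], 0, 0) := by
  intro chunk
  induction chunk with
  | nil => intro p s symbols h hlen; simp at hlen
  | cons b t ih =>
    intro p s symbols h _
    simp only [List.foldl_cons, bStep, Int.toNat_natCast]
    by_cases ht : t = []
    · subst ht
      simp only [List.length_cons, List.length_nil] at h
      rw [if_pos (by omega)]
      simp [symAux]
    · have hlt : (p : Int) + 1 ≠ (m : Int) := by
        have : 0 < t.length := List.length_pos_iff.mpr ht
        simp only [List.length_cons] at h; omega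
      rw [if_neg hlt]
      have : ((p : Int) + 1) = ((p + 1 : Nat) : Int) := by push_cast; ring
      rw [this, ih (p+1) (PySem.Int.bor s (b <<< p)) symbols (by simp only [List.length_cons] at h; omega)
        (List.length_pos_iff.mpr ht)]
      rfl

lemma bFold_spec (m : Nat) (hm : 0 < m) :
    ∀ (c : Nat) (l : List Int) (symbols : List Int), l.length = c * m →
      (l.foldl (bStep (m : Int)) (symbols, 0, 0)).1 = symbols ++ specSyms m c l := by
  intro c
  induction c with
  | zero =>
    intro l symbols h
    have : l = [] := List.eq_nil_of_length_eq_zero (by omega)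
    subst this; simp [specSyms]
  | succ c ih =>
    intro l symbols h
    have hml : m ≤ l.length := by rw [h, Nat.succ_mul]; omega
    have htake : (l.take m).length = m := by simp [hml]
    have hdrop : (l.drop m).length = c * m := by rw [List.length_drop, h, Nat.succ_mul]; omega
    calc (l.foldl (bStep (m : Int)) (symbols, 0, 0)).1
        = ((l.take m ++ l.drop m).foldl (bStep (m : Int)) (symbols, 0, 0)).1 := by
          rw [List.take_append_drop]
      _ = ((l.drop m).foldl (bStep (m : Int)) ((l.take m).foldl (bStep (m : Int)) (symbols, 0, 0))).1 := by
          rw [List.foldl_append]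
      _ = symbols ++ specSyms m (c+1) l := by
          have h0 : ((0 : Nat) : Int) = (0 : Int) := rfl
          rw [show ((symbols, (0:Int), (0:Int)) : List Int × Int × Int)
                = (symbols, (0:Int), ((0:Nat) : Int)) from rfl,
             bStep_flush m (l.take m) 0 0 symbols (by omega) (by omega),
             ih (l.drop m) (symbols ++ [symAux 0 0 (l.take m)]) hdrop]
          simp [specSyms]

-- A's inner fold over positions equals symAux on the chunk
lemma symAux_eq_fold_range' (g : Nat → Int) :
    ∀ (chunk : List Int) (j : Nat) (s : Int),
      (∀ k (h : k < chunk.length), g (j+k) = chunk[k]) →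
      (List.range' j chunk.length).foldl (fun s k => PySem.Int.bor s (g k <<< k)) s = symAux j s chunk := by
  intro chunk
  induction chunk with
  | nil => intro j s _; rfl
  | cons b t ih =>
    intro j s hg
    simp only [List.length_cons, List.range'_succ, List.foldl_cons]
    have hb : g j = b := by have := hg 0 (by simp); simpa using this
    rw [hb]
    rw [ih (j+1) (PySem.Int.bor s (b <<< j)) (fun k hk => by
      have := hg (k+1) (by simpa using Nat.succ_lt_succ hk)
      simpa [Nat.add_assoc, Nat.add_comm 1 k] using this)]
    rfl

lemma spec_eq_map (m : Nat) :
    ∀ (c : Nat) (l : List Int), m * c ≤ l.length →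
      specSyms m c l = (List.range c).map (fun i => symAux 0 0 ((l.drop (i*m)).take m)) := by
  intro c
  induction c with
  | zero => intro l _; simp [specSyms]
  | succ c ih =>
    intro l h
    rw [List.range_succ_eq_map]
    simp only [specSyms, List.map_cons, List.map_map, Nat.zero_mul, List.drop_zero]
    refine List.cons_eq_cons.mpr ⟨rfl, ?_⟩
    rw [ih (l.drop m) (by rw [List.length_drop]; rw [Nat.mul_succ] at h; omega)]
    apply List.map_congr_left
    intro i _
    simp only [Function.comp]
    rw [List.drop_drop]
    congr 2
    simp [Nat.succ_mul]; omega

lemma foldl_append_map {γ β : Type} (f : γ → β) :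
    ∀ (l : List γ) (acc : List β), l.foldl (fun a x => a ++ [f x]) acc = acc ++ l.map f := by
  intro l
  induction l with
  | nil => intro acc; simp
  | cons x t ih => intro acc; simp [ih]

lemma floordiv_nonpos_of_neg (a b : Int) (ha : 0 ≤ a) (hb : b < 0) :
    PySem.Int.floordiv a b ≤ 0 := by
  unfold PySem.Int.floordiv
  rw [Int.fdiv_eq_ediv]
  have h1 : a / b ≤ 0 := Int.ediv_nonpos_of_nonneg_of_nonpos ha (le_of_lt hb)
  split_ifs <;> omega

-- positive case, A side: A's output as a map over chunk indices
lemma portA_pos (bits : List Int) (m : Nat) (hm : 0 < m) :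
    get_symbols_from_bits bits (m : Int)
      = (List.range (bits.length / m)).map
          (fun i => symAux 0 0 ((bits.drop (i*m)).take m)) := by
  unfold get_symbols_from_bits
  dsimp only
  have hc : PySem.Int.floordiv (bits.length : Int) (m : Int) = ((bits.length / m : Nat) : Int) :=
    PySem.Int.floordiv_natCast _ _
  rw [hc]
  set c := bits.length / m with hcdef
  rw [PySem.List.pyRange_one, PySem.List.pyRange_one]
  simp only [Int.sub_zero, Int.toNat_natCast, List.foldl_map, zero_add]
  rw [foldl_append_map]
  simp only [List.nil_append]
  apply List.map_congr_left
  intro i hi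
  have hi' : i < c := List.mem_range.mp hi
  have h1 : c * m ≤ bits.length := Nat.div_mul_le_self _ _
  have hchunklen : ((bits.drop (i*m)).take m).length = m := by
    have : i * m + m ≤ bits.length := by nlinarith
    simp [List.length_take, List.length_drop]; omega
  rw [List.range_eq_range']
  have hfold := symAux_eq_fold_range'
    (fun k => PySem.List.pyGetD bits ((k : Int) + (i : Int) * (m : Int)) 0)
    ((bits.drop (i*m)).take m) 0 0 (by
      intro k hk
      have hk' : k < m := by rw [hchunklen] at hk; exact hk
      have hidx : i * m + k < bits.length := by nlinarith
      simp only [Nat.zero_add]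
      rw [show ((k : Nat) : Int) + (i : Int) * (m : Int) = ((i * m + k : Nat) : Int) by
        push_cast; ring]
      rw [PySem.List.pyGetD_natCast, List.getD_eq_getElem _ _ hidx,
        List.getElem_take, List.getElem_drop])
  rw [hchunklen] at hfold
  exact hfold

-- positive case, B side
lemma portB_pos (bits : List Int) (m : Nat) (hm : 0 < m) :
    get_symbols_from_bits_alt bits (m : Int)
      = (List.range (bits.length / m)).map
          (fun i => symAux 0 0 ((bits.drop (i*m)).take m)) := by
  unfold get_symbols_from_bits_alt
  dsimp only
  have hc : PySem.Int.floordiv (bits.length : Int) (m : Int) = ((bits.length / m : Nat) : Int) :=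
    PySem.Int.floordiv_natCast _ _
  rw [hc]
  set c := bits.length / m with hcdef
  have hcm : ((c : Int) * (m : Int)) = ((c * m : Nat) : Int) := by push_cast; ring
  rw [hcm, PySem.List.slice_to_natCast]
  have hle : c * m ≤ bits.length := Nat.div_mul_le_self _ _
  have hlen : (bits.take (c*m)).length = c * m := by simp [hle]
  have hstep : (fun (st : List Int × Int × Int) (bit : Int) =>
      let symbol := PySem.Int.bor st.2.1 (bit <<< st.2.2.toNat)
      let pos := st.2.2 + 1
      if pos = ((m : Nat) : Int) then (st.1 ++ [symbol], 0, 0) else (st.1, symbol, pos))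
      = bStep (m : Int) := rfl
  rw [hstep, bFold_spec m hm c (bits.take (c*m)) [] hlen]
  rw [spec_eq_map m c (bits.take (c*m)) (by rw [hlen]; exact le_of_eq (Nat.mul_comm m c))]
  simp only [List.nil_append]
  apply List.map_congr_left
  intro i hi
  have hi' : i < c := List.mem_range.mp hi
  congr 1
  rw [List.drop_take, List.take_take]
  congr 1
  have h2 : i * m + m ≤ c * m := by nlinarith
  omega

-- ===== VERDICT (by name: the statement is the Claim_ definition above) =====
theorem get_symbols_from_bits_spec : Claim_equal_get_symbols_from_bits := by
  intro bits slb _ hpre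
  unfold Spec_get_symbols_from_bits
  rcases lt_trichotomy slb 0 with hneg | h0 | hpos
  · -- slb < 0: both sides are []
    have hA : get_symbols_from_bits bits slb = [] := by
      unfold get_symbols_from_bits
      dsimp only
      have htot : PySem.Int.floordiv (bits.length : Int) slb ≤ 0 :=
        floordiv_nonpos_of_neg _ _ (by positivity) hneg
      have hempty : PySem.List.pyRange 0 (PySem.Int.floordiv (bits.length : Int) slb) = [] := by
        rw [PySem.List.pyRange_one]
        have h0 : ((PySem.Int.floordiv (bits.length : Int) slb) - 0).toNat = 0 := by omega
        rw [h0]; rfl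
      rw [hempty]
      rfl
    have hB : get_symbols_from_bits_alt bits slb = [] := by
      unfold get_symbols_from_bits_alt
      dsimp only
      have hstep : (fun (st : List Int × Int × Int) (bit : Int) =>
          let symbol := PySem.Int.bor st.2.1 (bit <<< st.2.2.toNat)
          let pos := st.2.2 + 1
          if pos = slb then (st.1 ++ [symbol], 0, 0) else (st.1, symbol, pos))
          = bStep slb := rfl
      rw [hstep]
      exact bStep_noflush slb (le_of_lt hneg) _ [] 0 0 le_rfl
    rw [hA, hB]
  · exact absurd h0 hpre
  · obtain ⟨m, rfl⟩ : ∃ m : Nat, slb = (m : Int) := ⟨slb.toNat, (Int.toNat_of_nonneg (le_of_lt hpos)).symm⟩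
    have hm : 0 < m := by exact_mod_cast hpos
    rw [portA_pos bits m hm, portB_pos bits m hm]
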